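-- pv_equiv track=rewrite | github.com/burninghering/CodingTest | programmers/test(solve).py | solution
-- ===== SOURCE A (Python) =====
-- from itertools import cycle
--
-- def solution(answers):
--     cycles=[
--         cycle([1,2,3,4,5]),
--         cycle([2,1,2,3,2,4,2,5]),
--         cycle([3,3,1,1,2,2,4,4,5,5])
--     ]
--
--     count=[0,0,0]
--
--     for answer in answers:
--         for i in range(3):
--             if answer==next(cycles[i]):
--                 count[i]+=1
--
--
--     return [per+1 for per,score  in enumerate(count) if score==max(count)]
-- ===== SOURCE B (Python) =====
-- def solution(answers):
--     patterns = [
--         [1, 2, 3, 4, 5],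
--         [2, 1, 2, 3, 2, 4, 2, 5],
--         [3, 3, 1, 1, 2, 2, 4, 4, 5, 5],
--     ]
--     # All three patterns repeat with period dividing 40 (= lcm(5, 8, 10)).
--     # One pass builds a histogram of (position mod 40, answer) pairs; each
--     # supervisor's score is then read off the histogram with 40 lookups,
--     # without ever comparing an individual answer against a pattern.
--     hist = {}
--     for i, a in enumerate(answers):
--         key = (i % 40, a)
--         hist[key] = hist.get(key, 0) + 1
--     count = [sum(hist.get((r, p[r % len(p)]), 0) for r in range(40))
--              for p in patterns]
--     best = max(count)
--     return [i + 1 for i, c in enumerate(count) if c == best]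
-- ===== Notes on version B (the rewrite author's own statement) =====
-- stated objective: alternative
-- what changed: Instead of A's single interleaved pass that advances three stateful cycle iterators and compares every answer against each of them, B builds one histogram of (index mod 40, answer) pairs in a single pass and then computes each supervisor's score purely from the histogram via 40 dictionary lookups per pattern (40 = lcm of the pattern lengths), so the per-answer pattern comparisons disappear.
import Mathlib
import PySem

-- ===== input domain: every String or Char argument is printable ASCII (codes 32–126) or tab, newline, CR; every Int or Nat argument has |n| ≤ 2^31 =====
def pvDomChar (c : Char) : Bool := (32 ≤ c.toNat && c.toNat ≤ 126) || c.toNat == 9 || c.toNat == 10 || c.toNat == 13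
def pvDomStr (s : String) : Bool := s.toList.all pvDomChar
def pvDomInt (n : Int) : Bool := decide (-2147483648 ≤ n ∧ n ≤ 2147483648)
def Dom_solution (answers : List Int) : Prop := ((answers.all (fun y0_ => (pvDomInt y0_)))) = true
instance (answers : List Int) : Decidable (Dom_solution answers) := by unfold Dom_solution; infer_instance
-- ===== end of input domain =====

-- B replaces A's interleaved pass over three stateful cycle iterators by one
-- histogram of (index mod 40, answer) pairs from which the three scores are
-- read off by 40 lookups each (objective: alternative algorithm, same cost).

-- ===== PORT A =====
-- cycle(p) is modelled statefully, as Python does: a current position that is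
-- read and then advanced modulo len(p) at every `next`; one interleaved fold.
def solution (answers : List Int) : List Int :=
  let p1 : List Int := [1, 2, 3, 4, 5]
  let p2 : List Int := [2, 1, 2, 3, 2, 4, 2, 5]
  let p3 : List Int := [3, 3, 1, 1, 2, 2, 4, 4, 5, 5]
  let st :=
    answers.foldl
      (fun (st : (Nat × Nat × Nat) × (Int × Int × Int)) a =>
        let i1 := st.1.1; let i2 := st.1.2.1; let i3 := st.1.2.2
        let c1 := st.2.1; let c2 := st.2.2.1; let c3 := st.2.2.2
        (((i1 + 1) % 5, (i2 + 1) % 8, (i3 + 1) % 10),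
         (c1 + if a = p1.getD i1 0 then 1 else 0,
          c2 + if a = p2.getD i2 0 then 1 else 0,
          c3 + if a = p3.getD i3 0 then 1 else 0)))
      ((0, 0, 0), (0, 0, 0))
  let count : List Int := [st.2.1, st.2.2.1, st.2.2.2]
  let m := (PySem.List.max? count id).getD 0
  ((PySem.List.enumerate count 0).filter (fun ps => ps.2 == m)).map (fun ps => ps.1 + 1)

-- ===== PORT B =====
def solution_alt (answers : List Int) : List Int :=
  let patterns : List (List Int) :=
    [[1, 2, 3, 4, 5], [2, 1, 2, 3, 2, 4, 2, 5], [3, 3, 1, 1, 2, 2, 4, 4, 5, 5]]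
  -- hist[(i % 40, a)] += 1 over enumerate(answers)
  let hist : PySem.Dict (Int × Int) Int :=
    (PySem.List.enumerate answers 0).foldl
      (fun d ia =>
        let key := (PySem.Int.mod ia.1 40, ia.2)
        d.insert key (d.getD key 0 + 1))
      PySem.Dict.empty
  -- sum(hist.get((r, p[r % len(p)]), 0) for r in range(40))
  let count : List Int :=
    patterns.map (fun p =>
      ((PySem.List.pyRange 0 40 1).map
        (fun r => hist.getD (r, PySem.List.pyGetD p (PySem.Int.mod r (p.length : Int)) 0) 0)).sum)
  let best := (PySem.List.max? count id).getD 0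
  ((PySem.List.enumerate count 0).filter (fun ps => ps.2 == best)).map (fun ps => ps.1 + 1)

-- ===== PRECONDITION & SPEC =====
def Spec_solution (answers : List Int) (out : List Int) : Prop := out = solution_alt answers
instance (answers : List Int) (out : List Int) : Decidable (Spec_solution answers out) := by unfold Spec_solution; infer_instance

-- ===== CLAIM (what is proved, stated in full; the proofs are below) =====
def Claim_equal_solution : Prop := ∀ (answers : List Int), Dom_solution answers → Spec_solution answers (solution answers)

-- ===== LEMMAS AND PROOFS =====

-- proof-only helper: matches of pattern p against xs starting at offset s (mod p.length)
def pvCnt (p : List Int) (s : Nat) : List Int → Int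
  | [] => 0
  | a :: r => (if a = p.getD s 0 then 1 else 0) + pvCnt p ((s + 1) % p.length) r

-- A's interleaved fold computes the three pvCnt values
theorem foldlA_eq (answers : List Int) :
    ∀ (s1 s2 s3 : Nat) (c1 c2 c3 : Int),
      (answers.foldl
        (fun (st : (Nat × Nat × Nat) × (Int × Int × Int)) a =>
          (((st.1.1 + 1) % 5, (st.1.2.1 + 1) % 8, (st.1.2.2 + 1) % 10),
           (st.2.1 + if a = ([1, 2, 3, 4, 5] : List Int).getD st.1.1 0 then 1 else 0,
            st.2.2.1 + if a = ([2, 1, 2, 3, 2, 4, 2, 5] : List Int).getD st.1.2.1 0 then 1 else 0,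
            st.2.2.2 + if a = ([3, 3, 1, 1, 2, 2, 4, 4, 5, 5] : List Int).getD st.1.2.2 0 then 1 else 0)))
        ((s1, s2, s3), (c1, c2, c3))).2
      = (c1 + pvCnt [1, 2, 3, 4, 5] s1 answers,
         c2 + pvCnt [2, 1, 2, 3, 2, 4, 2, 5] s2 answers,
         c3 + pvCnt [3, 3, 1, 1, 2, 2, 4, 4, 5, 5] s3 answers) := by
  induction answers with
  | nil => intro s1 s2 s3 c1 c2 c3; simp [pvCnt]
  | cons a r ih =>
    intro s1 s2 s3 c1 c2 c3
    simp only [List.foldl_cons]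
    rw [ih]
    rw [pvCnt, pvCnt, pvCnt]
    refine Prod.ext ?_ (Prod.ext ?_ ?_) <;> simp <;> ring

-- B's histogram lookup is a pair count over the key list
def pvKeys (answers : List Int) (s : Nat) : List (Int × Int) :=
  (PySem.List.enumerate answers (s : Int)).map (fun ia => (PySem.Int.mod ia.1 40, ia.2))

theorem hist_getD (answers : List Int) (v : Int × Int) :
    ((PySem.List.enumerate answers 0).foldl
      (fun (d : PySem.Dict (Int × Int) Int) ia =>
        let key := (PySem.Int.mod ia.1 40, ia.2)
        d.insert key (d.getD key 0 + 1))
      PySem.Dict.empty).getD v 0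
    = ((pvKeys answers 0).count v : Int) := by
  have h : (fun (d : PySem.Dict (Int × Int) Int) (ia : Int × Int) =>
        let key := (PySem.Int.mod ia.1 40, ia.2)
        d.insert key (d.getD key 0 + 1))
      = fun d ia => d.insert (PySem.Int.mod ia.1 40, ia.2)
          (d.getD (PySem.Int.mod ia.1 40, ia.2) 0 + 1) := rfl
  have h2 := PySem.Dict.getD_foldl_insert_add_one
      (l := pvKeys answers 0) (d := (PySem.Dict.empty : PySem.Dict (Int × Int) Int)) (v := v)
  rw [pvKeys, List.foldl_map] at h2
  simp only [Nat.cast_zero] at h2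
  rw [h, h2, pvKeys]
  simp only [Nat.cast_zero, PySem.Dict.getD_empty, zero_add]

-- a 0/1 range sum picking out a single index
theorem range_sum_single (f : Nat → Int) :
    ∀ (N t : Nat), t < N → (∀ j, j < N → j ≠ t → f j = 0) →
      ((List.range N).map f).sum = f t := by
  intro N
  induction N with
  | zero => intro t ht _; omega
  | succ N ih =>
    intro t ht h0
    rw [List.range_succ, List.map_append, List.sum_append]
    by_cases ht' : t = N
    · subst ht'
      have hz : ((List.range t).map f).sum = 0 := by
        apply List.sum_eq_zero
        intro x hx
        obtain ⟨j, hj, rfl⟩ := List.mem_map.mp hx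
        have hjt : j < t := List.mem_range.mp hj
        exact h0 j (by omega) (by omega)
      simp [hz]
    · have hN : f N = 0 := h0 N (Nat.lt_succ_self N) (fun h => ht' h.symm)
      rw [ih t (by omega) (fun j hj hjt => h0 j (by omega) hjt)]
      simp [hN]

-- the 40-term histogram sum equals pvCnt for a pattern whose length divides 40
theorem sum_counts_eq (p : List Int) (hd : p.length ∣ 40) :
    ∀ (answers : List Int) (s : Nat),
      ((PySem.List.pyRange 0 40 1).map
        (fun r => ((pvKeys answers s).count
            (r, PySem.List.pyGetD p (PySem.Int.mod r (p.length : Int)) 0) : Int))).sum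
      = pvCnt p (s % p.length) answers := by
  intro answers
  induction answers with
  | nil =>
    intro s
    have hk : pvKeys [] s = [] := by simp [pvKeys, PySem.List.enumerate_nil]
    rw [hk]
    simp [pvCnt, List.count_nil]
  | cons a rest ih =>
    intro s
    have hm : PySem.Int.mod (s : Int) (40 : Int) = ((s % 40 : Nat) : Int) := by
      rw [show ((40 : Int)) = ((40 : Nat) : Int) by norm_num, PySem.Int.mod_natCast]
    have hkeys : pvKeys (a :: rest) s
        = (((s % 40 : Nat) : Int), a) :: pvKeys rest (s + 1) := by
      unfold pvKeys
      rw [PySem.List.enumerate_cons, List.map_cons]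
      have hc : ((s : Int) + 1) = ((s + 1 : Nat) : Int) := by push_cast; ring
      simp only []
      rw [hm, hc]
    rw [hkeys]
    simp only [List.count_cons, Nat.cast_add, Nat.cast_ite, Nat.cast_one, Nat.cast_zero]
    rw [PySem.List.sum_map_add_int]
    rw [ih (s + 1)]
    have hrange : PySem.List.pyRange 0 40 1
        = (List.range 40).map (fun k : Nat => ((k : Int))) := by
      rw [PySem.List.pyRange_one]
      simp
    rw [hrange, List.map_map]
    have hind :
        ((List.range 40).map
          ((fun r => (if ((((s % 40 : Nat) : Int), a)
              == (r, PySem.List.pyGetD p (PySem.Int.mod r (p.length : Int)) 0))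
              then (1 : Int) else 0)) ∘ (fun k : Nat => (k : Int)))).sum
        = (if a = p.getD (s % p.length) 0 then (1 : Int) else 0) := by
      rw [range_sum_single _ 40 (s % 40) (Nat.mod_lt s (by norm_num))]
      · simp only [Function.comp]
        rw [PySem.Int.mod_natCast, Nat.mod_mod_of_dvd s hd, PySem.List.pyGetD_natCast]
        by_cases hcond : a = p.getD (s % p.length) 0
        · simp [hcond]
        · simp
      · intro j hj hjt
        simp only [Function.comp]
        have hne : ((s : Int) % 40) ≠ (j : Int) := by
          have h' : ((s % 40 : Nat) : Int) ≠ ((j : Nat) : Int) := by exact_mod_cast hjt.symm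
          simpa using h'
        simp [hne]
    rw [hind]
    rw [pvCnt]
    have hstep : (s + 1) % p.length = (s % p.length + 1) % p.length := by
      conv_lhs => rw [Nat.add_mod]
      simp [Nat.add_mod]
    rw [hstep]
    ring

theorem counts_eq (answers : List Int) :
    solution answers = solution_alt answers := by
  have hgetD := hist_getD answers
  have h1 := sum_counts_eq [1, 2, 3, 4, 5] (by decide) answers 0
  have h2 := sum_counts_eq [2, 1, 2, 3, 2, 4, 2, 5] (by decide) answers 0
  have h3 := sum_counts_eq [3, 3, 1, 1, 2, 2, 4, 4, 5, 5] (by decide) answers 0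
  have hA := foldlA_eq answers 0 0 0 0 0 0
  simp only [Nat.zero_mod] at h1 h2 h3
  unfold solution solution_alt
  simp only [List.map_cons, List.map_nil, hgetD]
  rw [h1, h2, h3, hA]
  norm_num

-- ===== VERDICT (by name: the statement is the Claim_ definition above) =====
theorem solution_spec : Claim_equal_solution := by
  intro answers _
  unfold Spec_solution
  exact counts_eq answers
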